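-- pv_equiv track=rewrite | github.com/aless-ishy/graph_positioning | python/structure/Graph.py | basic_positions
-- ===== SOURCE A (Python) =====
-- def basic_positions(size: int):
--     positions = [0] * (2 * size + 1)
--     value = 1
--     for i in range(0, size):
--         positions[size - (i + 1)] = value
--         positions[size + i + 1] = -value
--         value += 1
--     return positions
-- ===== SOURCE B (Python) =====
-- def basic_positions(size: int):
--     return list(range(size, -(size + 1), -1))
-- ===== Notes on version B (the rewrite author's own statement) =====
-- stated objective: simpler
-- what changed: Replaces the two-sided index-assignment fill loop over a preallocated zero list with a single closed-form descending range(size, -(size+1), -1).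
import Mathlib
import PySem

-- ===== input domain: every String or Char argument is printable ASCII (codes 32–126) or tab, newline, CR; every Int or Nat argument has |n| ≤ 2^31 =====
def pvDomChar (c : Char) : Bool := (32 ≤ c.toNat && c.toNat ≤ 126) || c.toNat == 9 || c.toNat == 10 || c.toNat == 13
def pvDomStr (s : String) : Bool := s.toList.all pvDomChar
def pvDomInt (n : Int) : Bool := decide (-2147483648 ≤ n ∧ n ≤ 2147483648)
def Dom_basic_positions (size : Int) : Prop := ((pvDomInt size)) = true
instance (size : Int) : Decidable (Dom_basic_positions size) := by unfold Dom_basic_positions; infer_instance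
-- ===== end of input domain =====

-- B replaces A's two-sided index-assignment fill loop with a single closed-form descending range (objective: simpler).

-- ===== PORT A =====
-- positions[idx] = v is ported as List.set idx.toNat v: on every iteration the loop
-- performs (0 ≤ i < size), both assigned indices satisfy 0 ≤ idx < len(positions), so this is exact.
def basic_positions (size : Int) : List Int :=
  ((PySem.List.pyRange 0 size 1).foldl
    (fun (st : List Int × Int) i =>
      (((st.1.set (size - (i + 1)).toNat st.2).set (size + i + 1).toNat (-st.2)), st.2 + 1))
    (List.replicate (2 * size + 1).toNat 0, 1)).1

-- ===== PORT B =====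
def basic_positions_alt (size : Int) : List Int :=
  PySem.List.pyRange size (-(size + 1)) (-1)

-- ===== PRECONDITION & SPEC =====
def Spec_basic_positions (size : Int) (out : List Int) : Prop := out = basic_positions_alt size
instance (size : Int) (out : List Int) : Decidable (Spec_basic_positions size out) := by unfold Spec_basic_positions; infer_instance

-- ===== CLAIM (what is proved, stated in full; the proofs are below) =====
def Claim_equal_basic_positions : Prop := ∀ (size : Int), Dom_basic_positions size → Spec_basic_positions size (basic_positions size)

-- ===== LEMMAS AND PROOFS =====

-- Loop invariant: after the first m iterations (m ≤ s), the middle 2m+1 slots of the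
-- 2s+1 list hold s - j at index j, the rest are still 0, and value = m + 1.
lemma basic_positions_loopInv (s m : Nat) (hm : m ≤ s) :
    (PySem.List.pyRange 0 m 1).foldl
      (fun (st : List Int × Int) i =>
        (((st.1.set ((s : Int) - (i + 1)).toNat st.2).set ((s : Int) + i + 1).toNat (-st.2)), st.2 + 1))
      (List.replicate (2 * s + 1) 0, 1)
    = ((List.range (2 * s + 1)).map
        (fun j => if s ≤ j + m ∧ j ≤ s + m then (s : Int) - j else 0),
       (m : Int) + 1) := by
  induction m with
  | zero =>
    rw [show ((0:Nat):Int) = 0 from rfl, PySem.List.pyRange_one_eq_nil le_rfl]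
    simp only [List.foldl_nil, zero_add]
    refine Prod.ext ?_ rfl
    apply List.ext_getElem (by simp)
    intro j h1 h2
    simp only [List.getElem_replicate, List.getElem_map, List.getElem_range]
    split_ifs with h
    · have : j = s := by omega
      subst this; simp
    · rfl
  | succ m ih =>
    have hm' : m ≤ s := by omega
    have hcast : ((m + 1 : Nat) : Int) = (m : Int) + 1 := by push_cast; ring
    rw [hcast, PySem.List.pyRange_one_succ_right (by positivity), List.foldl_append, ih hm']
    simp only [List.foldl_cons, List.foldl_nil]
    refine Prod.ext ?_ (by push_cast; ring)
    have h1 : ((s : Int) - ((m : Int) + 1)).toNat = s - (m + 1) := by omega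
    have h2 : ((s : Int) + (m : Int) + 1).toNat = s + m + 1 := by omega
    simp only [h1, h2]
    apply List.ext_getElem (by simp)
    intro j hj1 hj2
    have hlen : j < 2 * s + 1 := by simpa using hj2
    simp only [List.getElem_set, List.getElem_map, List.getElem_range]
    split_ifs <;> first | rfl | (push_cast; omega) | omega

-- ===== VERDICT (by name: the statement is the Claim_ definition above) =====
theorem basic_positions_spec : Claim_equal_basic_positions := by
  intro size _
  unfold Spec_basic_positions basic_positions basic_positions_alt
  by_cases hpos : 0 ≤ size
  · -- size ≥ 0: the invariant at m = s gives the full descending list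
    obtain ⟨s, rfl⟩ : ∃ s : Nat, size = (s : Int) := ⟨size.toNat, (Int.toNat_of_nonneg hpos).symm⟩
    have htn : (2 * (s : Int) + 1).toNat = 2 * s + 1 := by omega
    rw [htn, basic_positions_loopInv s s le_rfl]
    rw [PySem.List.pyRange_neg_one]
    have htn2 : ((s : Int) - (-((s : Int) + 1))).toNat = 2 * s + 1 := by omega
    rw [htn2]
    apply List.map_congr_left
    intro j hj
    have : j < 2 * s + 1 := List.mem_range.mp hj
    rw [if_pos (by omega)]
  · -- size < 0: the loop never runs and both lists are empty
    rw [PySem.List.pyRange_one_eq_nil (by omega), PySem.List.pyRange_neg_one_eq_nil (by omega)]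
    simp only [List.foldl_nil]
    have : (2 * size + 1).toNat = 0 := by omega
    simp [this]
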